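-- pv_equiv track=rewrite | github.com/walkccc/LeetCode | solutions/3018. Maximum Number of Removal Queries That Can Be Processed I/3018.py | maximumProcessableQueries
-- ===== SOURCE A (Python) =====
-- def maximumProcessableQueries(
--
--     nums: list[int],
--     queries: list[int],
-- ) -> int:
--   n = len(nums)
--   # dp[i][j] := the maximum number of queries processed if nums[i..j] are not
--   # removed after processing dp[i][j] queries
--   dp = [[0] * n for _ in range(n)]
--
--   for d in range(n - 1, -1, -1):
--     for i in range(n):
--       j = i + d
--       if j >= n:
--         continue
--       if i > 0:
--         # Remove nums[i - 1] from nums[i - 1..j] if possible.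
--         dp[i][j] = max(dp[i][j], dp[i - 1][j] +
--                        (nums[i - 1] >= queries[dp[i - 1][j]]))
--       if j + 1 < n:
--         # Remove nums[j + 1] from nums[i..j + 1] if possible.
--         dp[i][j] = max(dp[i][j], dp[i][j + 1] +
--                        (nums[j + 1] >= queries[dp[i][j + 1]]))
--       if dp[i][j] == len(queries):
--         return len(queries)
--
--   return max(dp[i][i] + (nums[i] >= queries[dp[i][i]])
--              for i in range(n))
-- ===== SOURCE B (Python) =====
-- def maximumProcessableQueries(
--     nums: list[int],
--     queries: list[int],
-- ) -> int:
--   n = len(nums)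
--   q = len(queries)
--
--   def step(v, x):
--     # advance the processed count v by removing element x; saturate at q
--     if v >= q:
--       return q
--     return v + (x >= queries[v])
--
--   # Top-down recursion over intervals: f(i, j) = max queries processed while
--   # nums[i..j] remain, recursing to the larger intervals [i-1, j] and [i, j+1]
--   # (base: the full interval, where neither guard fires, giving 0).  The memo
--   # dict plus an explicit work stack evaluates the recursion depth-safely.
--   memo = {}
--
--   def f(i, j):
--     stack = [(i, j)]
--     while stack:
--       a, b = stack[-1]
--       if (a, b) in memo:
--         stack.pop()
--         continue
--       need = []
--       if a > 0 and (a - 1, b) not in memo: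
--         need.append((a - 1, b))
--       if b + 1 < n and (a, b + 1) not in memo:
--         need.append((a, b + 1))
--       if need:
--         stack.extend(need)
--         continue
--       best = 0
--       if a > 0:
--         best = step(memo[(a - 1, b)], nums[a - 1])
--       if b + 1 < n:
--         best = max(best, step(memo[(a, b + 1)], nums[b + 1]))
--       memo[(a, b)] = best
--       stack.pop()
--     return memo[(i, j)]
--
--   return max(step(f(i, i), nums[i]) for i in range(n))
-- ===== Notes on version B (the rewrite author's own statement) =====
-- stated objective: alternative
-- what changed: Replaces A's bottom-up n-by-n table filled diagonal by diagonal with a mid-loop early return by a top-down memoized recursion f(i,j) over intervals (recursing to the larger neighbours [i-1,j] and [i,j+1]) evaluated with an explicit work stack, using a saturating step that caps values at len(queries) instead of the early return.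
import Mathlib
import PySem

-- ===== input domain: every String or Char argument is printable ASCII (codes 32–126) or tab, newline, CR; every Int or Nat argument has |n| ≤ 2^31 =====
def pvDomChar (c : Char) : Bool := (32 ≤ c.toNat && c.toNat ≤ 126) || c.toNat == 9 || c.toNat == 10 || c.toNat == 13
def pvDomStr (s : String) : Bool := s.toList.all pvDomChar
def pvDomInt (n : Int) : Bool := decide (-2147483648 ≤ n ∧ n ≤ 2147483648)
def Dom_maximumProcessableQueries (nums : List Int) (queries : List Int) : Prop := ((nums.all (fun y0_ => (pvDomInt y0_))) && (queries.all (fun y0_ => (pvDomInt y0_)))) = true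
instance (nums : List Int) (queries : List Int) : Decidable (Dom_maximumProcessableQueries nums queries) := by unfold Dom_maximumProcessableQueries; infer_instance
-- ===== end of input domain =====

-- B replaces A's bottom-up n×n table sweep (with its mid-loop early return) by a
-- top-down memoized recursion f(i,j) over intervals with a saturating step; equal
-- return value on Pre_ (nums ≠ []); same asymptotic cost, alternative decomposition.

-- ===== PORT A =====
-- dp[i][j] read/write (indices are always in range on the paths A takes; Python would
-- raise IndexError out of range, pyGetD/pySetD with defaults are exact here because the
-- loop bounds keep 0 ≤ i,j < n).
def pvGet2 (dp : List (List Int)) (i j : Int) : Int :=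
  PySem.List.pyGetD (PySem.List.pyGetD dp i []) j 0

def pvSet2 (dp : List (List Int)) (i j : Int) (v : Int) : List (List Int) :=
  PySem.List.pySetD dp i (PySem.List.pySetD (PySem.List.pyGetD dp i []) j v)

-- the inner 'for i in range(n)' loop; '.error r' models A's early 'return len(queries)'.
-- 'queries[dp[..][..]]' is ported as pyGetD with default 0: on every input in Pre_ the
-- early-return guard keeps each stored dp value strictly below len(queries), so the
-- index is always in range and Python never raises there.
def pvAInner (nums queries : List Int) (n d : Int) :
    List Int → List (List Int) → Except Int (List (List Int))
  | [], dp => .ok dp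
  | i :: rest, dp =>
    let j := i + d
    if n ≤ j then pvAInner nums queries n d rest dp
    else
      let dp1 := if 0 < i then
          pvSet2 dp i j (max (pvGet2 dp i j)
            (pvGet2 dp (i-1) j +
              (if PySem.List.pyGetD queries (pvGet2 dp (i-1) j) 0 ≤ PySem.List.pyGetD nums (i-1) 0
               then (1:Int) else 0)))
        else dp
      let dp2 := if j + 1 < n then
          pvSet2 dp1 i j (max (pvGet2 dp1 i j)
            (pvGet2 dp1 i (j+1) +
              (if PySem.List.pyGetD queries (pvGet2 dp1 i (j+1)) 0 ≤ PySem.List.pyGetD nums (j+1) 0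
               then (1:Int) else 0)))
        else dp1
      if pvGet2 dp2 i j = (queries.length : Int) then .error (queries.length : Int)
      else pvAInner nums queries n d rest dp2

-- the outer 'for d in range(n - 1, -1, -1)' loop
def pvAOuter (nums queries : List Int) (n : Int) :
    List Int → List (List Int) → Except Int (List (List Int))
  | [], dp => .ok dp
  | d :: rest, dp =>
    match pvAInner nums queries n d (PySem.List.pyRange 0 n 1) dp with
    | .error r => .error r
    | .ok dp' => pvAOuter nums queries n rest dp'

def maximumProcessableQueries (nums : List Int) (queries : List Int) : Int :=
  let n : Int := (nums.length : Int)
  let dp0 : List (List Int) := List.replicate nums.length (List.replicate nums.length (0:Int))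
  match pvAOuter nums queries n (PySem.List.pyRange (n-1) (-1) (-1)) dp0 with
  | .error r => r
  | .ok dp =>
    -- max(...) over range(n); Python raises ValueError when n = 0 (excluded by Pre_),
    -- so the .getD 0 default is never used on Pre_.
    ((PySem.List.max? ((PySem.List.pyRange 0 n 1).map (fun i =>
        pvGet2 dp i i +
          (if PySem.List.pyGetD queries (pvGet2 dp i i) 0 ≤ PySem.List.pyGetD nums i 0
           then (1:Int) else 0))) (fun x => x)).getD 0)

-- ===== PORT B =====
-- Source B's 'step': saturating advance of the processed count.  'queries[v]' is only
-- evaluated under 0 ≤ v < len(queries) in Source B, so pyGetD's default is never used.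
def pvStep (queries : List Int) (q v x : Int) : Int :=
  if q ≤ v then q
  else v + (if PySem.List.pyGetD queries v 0 ≤ x then (1:Int) else 0)

-- Source B's recursion f(i, j): recurse to the larger intervals [i-1, j] and [i, j+1];
-- at the full interval neither guard fires and the value is 0.  Source B evaluates this
-- very recursion with a memo dict and an explicit work stack (a depth-safe evaluation
-- strategy computing the same values for the same cells); ported as the recursion.
def pvF (nums queries : List Int) (n q : Int) (i j : Int) : Int :=
  let best1 : Int :=
    if _h : 0 < i then
      pvStep queries q (pvF nums queries n q (i-1) j) (PySem.List.pyGetD nums (i-1) 0)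
    else 0
  if _h2 : j + 1 < n then
    max best1 (pvStep queries q (pvF nums queries n q i (j+1)) (PySem.List.pyGetD nums (j+1) 0))
  else best1
termination_by (i.toNat + (n - 1 - j).toNat)
decreasing_by
  · omega
  · omega

def maximumProcessableQueries_alt (nums : List Int) (queries : List Int) : Int :=
  let n : Int := (nums.length : Int)
  let q : Int := (queries.length : Int)
  -- max over a generator; ValueError on n = 0 (excluded by Pre_), .getD 0 never used on Pre_
  ((PySem.List.max? ((PySem.List.pyRange 0 n 1).map (fun i =>
      pvStep queries q (pvF nums queries n q i i) (PySem.List.pyGetD nums i 0))) (fun x => x)).getD 0)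

-- ===== PRECONDITION & SPEC =====
-- Pre_ excludes exactly nums = [], where both A and B raise ValueError (max() of an
-- empty sequence).
def Pre_maximumProcessableQueries (nums : List Int) (queries : List Int) : Prop :=
  nums ≠ []
instance (nums : List Int) (queries : List Int) : Decidable (Pre_maximumProcessableQueries nums queries) := by
  unfold Pre_maximumProcessableQueries; infer_instance

def pvWitness_maximumProcessableQueries : List Int × List Int := ([3, 1, 2], [1, 2, 3, 4])

def Spec_maximumProcessableQueries (nums : List Int) (queries : List Int) (out : Int) : Prop := out = maximumProcessableQueries_alt nums queries
instance (nums : List Int) (queries : List Int) (out : Int) : Decidable (Spec_maximumProcessableQueries nums queries out) := by unfold Spec_maximumProcessableQueries; infer_instance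

-- ===== CLAIM (what is proved, stated in full; the proofs are below) =====
def Claim_equal_maximumProcessableQueries : Prop := ∀ (nums : List Int) (queries : List Int), Dom_maximumProcessableQueries nums queries → Pre_maximumProcessableQueries nums queries → Spec_maximumProcessableQueries nums queries (maximumProcessableQueries nums queries)

-- ===== LEMMAS AND PROOFS =====

-- what Source B's recursion appends at index i of the width-d row built from row prev
-- (the closed row form both programs are reduced to)
def pvBody (nums queries : List Int) (n q d : Int) (prev : List Int) (i : Int) : Int :=
  if i + d + 1 < n
  then max (if 0 < i then pvStep queries q (PySem.List.pyGetD prev (i-1) 0) (PySem.List.pyGetD nums (i-1) 0) else 0)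
       (pvStep queries q (PySem.List.pyGetD prev i 0) (PySem.List.pyGetD nums (i+d+1) 0))
  else (if 0 < i then pvStep queries q (PySem.List.pyGetD prev (i-1) 0) (PySem.List.pyGetD nums (i-1) 0) else 0)

-- the row of all width-d values, as a list
def pvBRow (nums queries : List Int) (n q d : Int) (prev : List Int) : List Int :=
  (PySem.List.pyRange 0 (n - d) 1).map (pvBody nums queries n q d prev)

theorem pvBRow_length (nums queries : List Int) (n q d : Int) (prev : List Int) :
    (pvBRow nums queries n q d prev).length = (n - d).toNat := by
  unfold pvBRow
  simp [PySem.List.length_pyRange_one]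

-- the row of width d (rows of widths n-1 .. d folded from [])
def pvRow (nums queries : List Int) (n q : Int) (d : Int) : List Int :=
  (PySem.List.pyRange (n-1) (d-1) (-1)).foldl (fun prev d' => pvBRow nums queries n q d' prev) []

theorem pvRange_neg_one_snoc {a b : Int} (h : b < a) :
    PySem.List.pyRange a b (-1) = PySem.List.pyRange a (b+1) (-1) ++ [b+1] := by
  rw [PySem.List.pyRange_neg_one_eq_reverse a b, PySem.List.pyRange_one_cons (show b+1 < a+1 by omega),
      List.reverse_cons, PySem.List.pyRange_neg_one_eq_reverse a (b+1)]

theorem pvRow_of_ge (nums queries : List Int) (n q d : Int) (h : n ≤ d) :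
    pvRow nums queries n q d = [] := by
  unfold pvRow
  rw [PySem.List.pyRange_neg_one_eq_nil (by omega)]
  rfl

theorem pvRow_rec (nums queries : List Int) (n q d : Int) (h : d ≤ n - 1) :
    pvRow nums queries n q d = pvBRow nums queries n q d (pvRow nums queries n q (d+1)) := by
  unfold pvRow
  rw [pvRange_neg_one_snoc (show d - 1 < n - 1 by omega), List.foldl_append,
      show (d:Int)-1+1 = d by ring, show (d:Int)+1-1 = d by ring]
  rfl

theorem pvRow_length (nums queries : List Int) (n q d : Int) :
    (pvRow nums queries n q d).length = (n - d).toNat := by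
  by_cases h : d ≤ n - 1
  · rw [pvRow_rec nums queries n q d h, pvBRow_length]
  · rw [pvRow_of_ge nums queries n q d (by omega)]
    simp
    omega

theorem pvStep_bound (queries : List Int) (q v x : Int) (h0 : 0 ≤ q) (h1 : 0 ≤ v) (h2 : v ≤ q) :
    0 ≤ pvStep queries q v x ∧ pvStep queries q v x ≤ q := by
  unfold pvStep
  split_ifs <;> omega

theorem pyGetD_prop {α : Type} {P : α → Prop} (xs : List α) (i : Int) (d : α)
    (h0 : P d) (h : ∀ v ∈ xs, P v) : P (PySem.List.pyGetD xs i d) := by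
  by_cases hr : PySem.Raise.InRange xs.length i
  · exact h _ (PySem.List.pyGetD_mem xs d hr)
  · rw [PySem.List.pyGetD_of_none xs i d ((PySem.List.pyGet?_eq_none_iff xs i).mpr hr)]
    exact h0

theorem pvBest1_bound (nums queries : List Int) (q i : Int) (prev : List Int)
    (h0 : 0 ≤ q) (hprev : ∀ v ∈ prev, 0 ≤ v ∧ v ≤ q) :
    0 ≤ (if 0 < i then pvStep queries q (PySem.List.pyGetD prev (i-1) 0) (PySem.List.pyGetD nums (i-1) 0) else 0) ∧
    (if 0 < i then pvStep queries q (PySem.List.pyGetD prev (i-1) 0) (PySem.List.pyGetD nums (i-1) 0) else 0) ≤ q := by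
  split_ifs with h
  · have hg := pyGetD_prop (P := fun v => 0 ≤ v ∧ v ≤ q) prev (i-1) 0 ⟨le_refl 0, h0⟩ hprev
    exact pvStep_bound queries q _ _ h0 hg.1 hg.2
  · exact ⟨le_refl 0, h0⟩

theorem pvBody_bound (nums queries : List Int) (n q d i : Int) (prev : List Int)
    (h0 : 0 ≤ q) (hprev : ∀ v ∈ prev, 0 ≤ v ∧ v ≤ q) :
    0 ≤ pvBody nums queries n q d prev i ∧ pvBody nums queries n q d prev i ≤ q := by
  have hb1 := pvBest1_bound nums queries q i prev h0 hprev
  have hg := pyGetD_prop (P := fun v => 0 ≤ v ∧ v ≤ q) prev i 0 ⟨le_refl 0, h0⟩ hprev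
  have hs2 := pvStep_bound queries q _ (PySem.List.pyGetD nums (i+d+1) 0) h0 hg.1 hg.2
  unfold pvBody
  by_cases h1 : i + d + 1 < n
  · rw [if_pos h1]
    exact ⟨le_max_of_le_left hb1.1, max_le hb1.2 hs2.2⟩
  · rw [if_neg h1]
    exact hb1

theorem pvRow_bound (nums queries : List Int) (n q : Int) (h0 : 0 ≤ q) :
    ∀ (d : Int), ∀ v ∈ pvRow nums queries n q d, 0 ≤ v ∧ v ≤ q := by
  have main : ∀ (m : Nat) (d : Int), (n - d).toNat ≤ m → ∀ v ∈ pvRow nums queries n q d, 0 ≤ v ∧ v ≤ q := by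
    intro m
    induction m with
    | zero =>
      intro d hd v hv
      rw [pvRow_of_ge nums queries n q d (by omega)] at hv
      cases hv
    | succ m ih =>
      intro d hd v hv
      by_cases hnd : n ≤ d
      · rw [pvRow_of_ge nums queries n q d hnd] at hv
        cases hv
      · rw [pvRow_rec nums queries n q d (by omega)] at hv
        unfold pvBRow at hv
        rcases List.mem_map.mp hv with ⟨i, _, rfl⟩
        exact pvBody_bound nums queries n q d i _ h0 (fun v hv => ih (d+1) (by omega) v hv)
  intro d
  exact main (n - d).toNat d le_rfl

theorem pvStep_of_lt (queries : List Int) (q v x : Int) (h : v < q) :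
    pvStep queries q v x = v + (if PySem.List.pyGetD queries v 0 ≤ x then (1:Int) else 0) := by
  unfold pvStep
  rw [if_neg (by omega)]

theorem pvStep_of_eq (queries : List Int) (q x : Int) :
    pvStep queries q q x = q := by
  unfold pvStep
  rw [if_pos (le_refl q)]

theorem pyGetD_out {α : Type} (xs : List α) (i : Int) (d : α) (h : (xs.length : Int) ≤ i) :
    PySem.List.pyGetD xs i d = d := by
  apply PySem.List.pyGetD_of_none
  rw [PySem.List.pyGet?_eq_none_iff]
  intro hr
  unfold PySem.Raise.InRange at hr
  omega

-- the row value at index c is pvBody c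
theorem pvRowVal (nums queries : List Int) (n q d c : Int) (prev : List Int)
    (hc0 : 0 ≤ c) (hcd : c < n - d) :
    PySem.List.pyGetD (pvBRow nums queries n q d prev) c 0 = pvBody nums queries n q d prev c := by
  unfold pvBRow
  exact PySem.List.pyGetD_map_pyRange_of_nonneg _ _ _ _ hc0 hcd

-- B's recursion computes exactly the width-(j-i) row entry at index i
theorem pvF_eq_row (nums queries : List Int) (n q : Int) :
    ∀ (m : Nat) (i j : Int), i.toNat + (n - 1 - j).toNat ≤ m → 0 ≤ i → i ≤ j → j < n →
      pvF nums queries n q i j = PySem.List.pyGetD (pvRow nums queries n q (j - i)) i 0 := by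
  intro m
  induction m with
  | zero =>
    intro i j hm hi0 hij hjn
    have hi : i = 0 := by omega
    have hj : j = n - 1 := by omega
    subst hi; subst hj
    rw [pvF]
    rw [dif_neg (by omega : ¬ (0:Int) < 0), dif_neg (by omega : ¬ n - 1 + 1 < n)]
    rw [pvRow_rec nums queries n q (n - 1 - 0) (by omega),
        pvRowVal nums queries n q (n - 1 - 0) 0 _ le_rfl (by omega)]
    unfold pvBody
    rw [if_neg (by omega), if_neg (by omega)]
  | succ m ih =>
    intro i j hm hi0 hij hjn
    rw [pvF]
    rw [pvRow_rec nums queries n q (j - i) (by omega),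
        pvRowVal nums queries n q (j - i) i _ hi0 (by omega)]
    unfold pvBody
    rw [show i + (j - i) + 1 = j + 1 by ring]
    have hprev1 : 0 < i →
        pvF nums queries n q (i-1) j
          = PySem.List.pyGetD (pvRow nums queries n q (j - i + 1)) (i-1) 0 := by
      intro h
      rw [ih (i-1) j (by omega) (by omega) (by omega) hjn,
          show j - (i-1) = j - i + 1 by ring]
    have hprev2 : j + 1 < n →
        pvF nums queries n q i (j+1)
          = PySem.List.pyGetD (pvRow nums queries n q (j - i + 1)) i 0 := by
      intro h
      rw [ih i (j+1) (by omega) hi0 (by omega) (by omega),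
          show j + 1 - i = j - i + 1 by ring]
    by_cases h1 : 0 < i <;> by_cases h2 : j + 1 < n
    · rw [dif_pos h1, dif_pos h2, if_pos h2, if_pos h1, hprev1 h1, hprev2 h2]
    · rw [dif_pos h1, dif_neg h2, if_neg h2, if_pos h1, hprev1 h1]
    · rw [dif_neg h1, dif_pos h2, if_pos h2, if_neg h1, hprev2 h2]
    · rw [dif_neg h1, dif_neg h2, if_neg h2, if_neg h1]

theorem pvRow_propagate (nums queries : List Int) (n q d : Int) (h0 : 0 ≤ q) (_hd : 0 ≤ d)
    (hm : q ∈ pvRow nums queries n q (d+1)) : q ∈ pvRow nums queries n q d := by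
  by_cases hn : n ≤ d + 1
  · rw [pvRow_of_ge nums queries n q (d+1) hn] at hm
    cases hm
  · have hlen := pvRow_length nums queries n q (d+1)
    obtain ⟨k, hk, hval⟩ := List.mem_iff_getElem.mp hm
    rw [hlen] at hk
    have hk' : (k : Int) < n - d - 1 := by omega
    have hprevb : ∀ v ∈ pvRow nums queries n q (d+1), 0 ≤ v ∧ v ≤ q :=
      pvRow_bound nums queries n q h0 (d+1)
    rw [pvRow_rec nums queries n q d (by omega)]
    unfold pvBRow
    refine List.mem_map.mpr ⟨(k : Int), PySem.List.mem_pyRange_one.mpr ⟨by positivity, by omega⟩, ?_⟩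
    have hgp : PySem.List.pyGetD (pvRow nums queries n q (d+1)) (k : Int) 0 = q := by
      rw [PySem.List.pyGetD_eq_getElem _ 0 (by positivity) (by rw [hlen]; omega)]
      simpa using hval
    have hb1 := pvBest1_bound nums queries q (k : Int) (pvRow nums queries n q (d+1)) h0 hprevb
    unfold pvBody
    rw [if_pos (show (k : Int) + d + 1 < n by omega), hgp, pvStep_of_eq]
    exact max_eq_right hb1.2

theorem pvRow_to_zero (nums queries : List Int) (n q : Int) (h0 : 0 ≤ q) (d : Int) (hd : 0 ≤ d)
    (hm : q ∈ pvRow nums queries n q d) : q ∈ pvRow nums queries n q 0 := by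
  have main : ∀ (k : Nat), q ∈ pvRow nums queries n q (k : Int) → q ∈ pvRow nums queries n q 0 := by
    intro k
    induction k with
    | zero => exact fun h => h
    | succ k ih =>
      intro hmm
      apply ih
      apply pvRow_propagate nums queries n q (k : Int) h0 (by positivity)
      have e : ((k : Int) + 1) = ((k + 1 : Nat) : Int) := by push_cast; ring
      rw [e]
      exact hmm
  have := main d.toNat
  rw [Int.toNat_of_nonneg hd] at this
  exact this hm

-- ===== A-side table lemmas =====

theorem pvSet2_length (dp : List (List Int)) (a b v : Int) :
    (pvSet2 dp a b v).length = dp.length := by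
  unfold pvSet2
  exact PySem.List.length_pySetD dp a _

theorem pvSet2_rows (dp : List (List Int)) (a b v : Int) (N : Int)
    (ha : 0 ≤ a) (hr : ∀ r ∈ dp, (r.length : Int) = N) :
    ∀ r ∈ pvSet2 dp a b v, (r.length : Int) = N := by
  intro r hrm
  unfold pvSet2 at hrm
  rw [PySem.List.pySetD_of_nonneg _ _ ha] at hrm
  rcases List.mem_or_eq_of_mem_set hrm with h | h
  · exact hr r h
  · subst h
    by_cases hL : a < (dp.length : Int)
    · have hrow : PySem.List.pyGetD dp a [] ∈ dp := by
        apply PySem.List.pyGetD_mem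
        unfold PySem.Raise.InRange
        omega
      rw [PySem.List.length_pySetD]
      exact hr _ hrow
    · have hno : dp.length ≤ a.toNat := by omega
      rw [List.set_eq_of_length_le hno] at hrm
      exact hr _ hrm

theorem pvGet2_pvSet2 (dp : List (List Int)) (a b v i j : Int)
    (ha0 : 0 ≤ a) (haL : a < (dp.length : Int))
    (hb0 : 0 ≤ b) (hbL : b < ((PySem.List.pyGetD dp a []).length : Int))
    (hi0 : 0 ≤ i) (hj0 : 0 ≤ j) :
    pvGet2 (pvSet2 dp a b v) i j = if i = a ∧ j = b then v else pvGet2 dp i j := by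
  unfold pvGet2 pvSet2
  rw [PySem.List.pySetD_of_nonneg _ _ hb0, PySem.List.pySetD_of_nonneg _ _ ha0]
  by_cases hiL : i < (dp.length : Int)
  · rw [PySem.List.pyGetD_eq_getElem _ _ hi0 (by rw [List.length_set]; exact hiL)]
    rw [List.getElem_set]
    by_cases hia : i = a
    · subst hia
      rw [if_pos (by omega : i.toNat = i.toNat)]
      by_cases hjL : j < ((PySem.List.pyGetD dp i []).length : Int)
      · rw [PySem.List.pyGetD_eq_getElem _ _ hj0 (by rw [List.length_set]; exact hjL)]
        rw [List.getElem_set]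
        by_cases hjb : j = b
        · rw [if_pos (by omega : b.toNat = j.toNat), if_pos ⟨rfl, hjb⟩]
        · rw [if_neg (by omega : ¬ b.toNat = j.toNat), if_neg (by tauto)]
          rw [PySem.List.pyGetD_eq_getElem _ _ hj0 hjL]
      · have hjL' : (((PySem.List.pyGetD dp i []).set b.toNat v).length : Int) ≤ j := by
          rw [List.length_set]; omega
        rw [pyGetD_out _ _ _ hjL', pyGetD_out _ _ _ (by omega)]
        rw [if_neg (by intro hc; exact absurd hc.2 (by omega))]
    · rw [if_neg (by omega : ¬ a.toNat = i.toNat)]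
      rw [if_neg (by tauto)]
      rw [PySem.List.pyGetD_eq_getElem dp ([] : List Int) hi0 hiL]
  · have h1 : PySem.List.pyGetD (dp.set a.toNat ((PySem.List.pyGetD dp a []).set b.toNat v)) i [] = [] := by
      apply pyGetD_out
      rw [List.length_set]
      omega
    have h2 : PySem.List.pyGetD dp i ([] : List Int) = [] := pyGetD_out _ _ _ (by omega)
    rw [h1, h2]
    rw [if_neg (by intro hc; exact absurd hc.1 (by omega))]

theorem pvGet2_replicate (N : Nat) (i j : Int) :
    pvGet2 (List.replicate N (List.replicate N (0:Int))) i j = 0 := by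
  unfold pvGet2
  have : PySem.List.pyGetD (List.replicate N (List.replicate N (0:Int))) i [] = [] ∨
      PySem.List.pyGetD (List.replicate N (List.replicate N (0:Int))) i [] = List.replicate N (0:Int) := by
    apply pyGetD_prop (P := fun r => r = [] ∨ r = List.replicate N (0:Int)) _ i [] (Or.inl rfl)
    intro r hrm
    exact Or.inr (List.eq_of_mem_replicate hrm)
  rcases this with h | h <;> rw [h]
  · apply pyGetD_prop (P := fun v => v = 0) _ j 0 rfl
    intro v hv
    cases hv
  · apply pyGetD_prop (P := fun v => v = 0) _ j 0 rfl
    intro v hv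
    exact List.eq_of_mem_replicate hv

-- invariant of A's dp table while processing row of width d, inner cursor c
def pvInv (nums queries : List Int) (n q : Int) (prev : List Int) (d c : Int) (dp : List (List Int)) : Prop :=
  (dp.length : Int) = n ∧ (∀ r ∈ dp, (r.length : Int) = n) ∧
  ∀ i j : Int, 0 ≤ i → i < n → 0 ≤ j → j < n → j ≤ i + d + 1 →
    pvGet2 dp i j = (if j = i + d + 1 then PySem.List.pyGetD prev i 0
      else if j = i + d ∧ i < c then PySem.List.pyGetD (pvBRow nums queries n q d prev) i 0 else 0)

theorem pvInv_shift (nums queries : List Int) (n q : Int) (prev prev' : List Int) (d : Int)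
    (dp : List (List Int)) (h : pvInv nums queries n q prev d n dp)
    (hprev' : prev' = pvBRow nums queries n q d prev) :
    pvInv nums queries n q prev' (d-1) 0 dp := by
  obtain ⟨hL, hR, hV⟩ := h
  refine ⟨hL, hR, ?_⟩
  intro i j hi0 hin hj0 hjn hj
  rw [hV i j hi0 hin hj0 hjn (by omega), hprev']
  split_ifs <;> first | rfl | omega

theorem pvGet2_write_self (dp : List (List Int)) (a b v : Int)
    (ha0 : 0 ≤ a) (haL : a < (dp.length : Int))
    (hb0 : 0 ≤ b) (hbL : b < ((PySem.List.pyGetD dp a []).length : Int)) :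
    pvGet2 (pvSet2 dp a b v) a b = v := by
  rw [pvGet2_pvSet2 dp a b v a b ha0 haL hb0 hbL ha0 hb0, if_pos ⟨rfl, rfl⟩]

theorem pvSet2_pvSet2 (dp : List (List Int)) (a b w v : Int) (ha0 : 0 ≤ a) (hb0 : 0 ≤ b) :
    pvSet2 (pvSet2 dp a b w) a b v = pvSet2 dp a b v := by
  unfold pvSet2
  have e1 : ∀ (xs : List (List Int)) (r : List Int), PySem.List.pySetD xs a r = xs.set a.toNat r :=
    fun xs r => PySem.List.pySetD_of_nonneg xs r ha0
  have e2 : ∀ (xs : List Int) (x : Int), PySem.List.pySetD xs b x = xs.set b.toNat x :=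
    fun xs x => PySem.List.pySetD_of_nonneg xs x hb0
  simp only [e1, e2]
  by_cases hL : a.toNat < dp.length
  · have hg : PySem.List.pyGetD (dp.set a.toNat ((PySem.List.pyGetD dp a []).set b.toNat w)) a [] =
        (PySem.List.pyGetD dp a []).set b.toNat w := by
      rw [PySem.List.pyGetD_eq_getElem _ _ ha0 (by simp only [List.length_set]; omega)]
      rw [List.getElem_set, if_pos rfl]
    rw [hg, List.set_set, List.set_set]
  · have hnop : dp.set a.toNat ((PySem.List.pyGetD dp a []).set b.toNat w) = dp :=
      List.set_eq_of_length_le (by omega)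
    rw [hnop]

theorem pvInv_write (nums queries : List Int) (n q : Int) (prev : List Int) (d c : Int)
    (dp : List (List Int)) (hd0 : 0 ≤ d) (hc0 : 0 ≤ c) (hcd : c + d < n)
    (hinv : pvInv nums queries n q prev d c dp) :
    pvInv nums queries n q prev d (c+1)
      (pvSet2 dp c (c+d) (pvBody nums queries n q d prev c)) := by
  obtain ⟨hL, hR, hV⟩ := hinv
  have hrowc : PySem.List.pyGetD dp c [] ∈ dp := by
    apply PySem.List.pyGetD_mem
    unfold PySem.Raise.InRange
    omega
  have hrowlen : ((PySem.List.pyGetD dp c []).length : Int) = n := hR _ hrowc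
  refine ⟨by rw [pvSet2_length]; exact hL, pvSet2_rows dp c (c+d) _ n hc0 hR, ?_⟩
  intro i j hi0 hin hj0 hjn hj
  rw [pvGet2_pvSet2 dp c (c+d) _ i j hc0 (by omega) (by omega) (by omega) hi0 hj0]
  by_cases hij : i = c ∧ j = c + d
  · rw [if_pos hij, if_neg (by omega), if_pos ⟨by omega, by omega⟩]
    obtain ⟨rfl, rfl⟩ := hij
    rw [pvRowVal nums queries n q d i prev hi0 (by omega)]
  · rw [if_neg hij, hV i j hi0 hin hj0 hjn hj]
    split_ifs <;> first | rfl | omega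

theorem pvInv_nowrite (nums queries : List Int) (n q : Int) (prev : List Int) (d c : Int)
    (dp : List (List Int)) (_hd0 : 0 ≤ d) (hc0 : 0 ≤ c) (hcd : c + d < n)
    (hbody0 : pvBody nums queries n q d prev c = 0)
    (hinv : pvInv nums queries n q prev d c dp) :
    pvInv nums queries n q prev d (c+1) dp := by
  obtain ⟨hL, hR, hV⟩ := hinv
  refine ⟨hL, hR, ?_⟩
  intro i j hi0 hin hj0 hjn hj
  rw [hV i j hi0 hin hj0 hjn hj]
  by_cases hij : i = c ∧ j = c + d
  · obtain ⟨rfl, rfl⟩ := hij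
    rw [if_neg (by omega), if_neg (by omega), if_neg (by omega),
        if_pos ⟨rfl, by omega⟩, pvRowVal nums queries n q d i prev hi0 (by omega), hbody0]
  · split_ifs <;> first | rfl | omega

theorem pvAInner_spec (nums queries : List Int) (n q d : Int) (prev : List Int)
    (hq : q = (queries.length : Int)) (hd0 : 0 ≤ d) (hdn : d ≤ n - 1)
    (hprev : ∀ v ∈ prev, 0 ≤ v ∧ v < q)
    (hlen : (prev.length : Int) = n - d - 1) :
    ∀ (m : Nat) (c : Int) (dp : List (List Int)), (n - c).toNat ≤ m → 0 ≤ c →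
    pvInv nums queries n q prev d c dp →
    (q ∈ (pvBRow nums queries n q d prev).drop c.toNat ∧
       pvAInner nums queries n d (PySem.List.pyRange c n 1) dp = .error q)
    ∨ (q ∉ (pvBRow nums queries n q d prev).drop c.toNat ∧
       ∃ dp', pvAInner nums queries n d (PySem.List.pyRange c n 1) dp = .ok dp' ∧
         pvInv nums queries n q prev d n dp') := by
  have hq0 : 0 ≤ q := by rw [hq]; positivity
  -- common "loop finished" case
  have hdone : ∀ (c : Int) (dp : List (List Int)), n ≤ c →
      pvInv nums queries n q prev d c dp →
      (q ∈ (pvBRow nums queries n q d prev).drop c.toNat ∧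
         pvAInner nums queries n d (PySem.List.pyRange c n 1) dp = .error q)
      ∨ (q ∉ (pvBRow nums queries n q d prev).drop c.toNat ∧
         ∃ dp', pvAInner nums queries n d (PySem.List.pyRange c n 1) dp = .ok dp' ∧
           pvInv nums queries n q prev d n dp') := by
    intro c dp hnc hinv
    rw [PySem.List.pyRange_one_eq_nil (by omega : n ≤ c)]
    right
    refine ⟨?_, dp, rfl, ?_⟩
    · rw [List.drop_eq_nil_of_le (by rw [pvBRow_length]; omega)]
      simp
    · obtain ⟨hL, hR, hV⟩ := hinv
      refine ⟨hL, hR, ?_⟩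
      intro i j hi0 hin hj0 hjn hj
      rw [hV i j hi0 hin hj0 hjn hj]
      split_ifs <;> first | rfl | omega
  intro m
  induction m with
  | zero =>
    intro c dp hm hc0 hinv
    exact hdone c dp (by omega) hinv
  | succ m ih =>
    intro c dp hm hc0 hinv
    by_cases hcn : n ≤ c
    · exact hdone c dp hcn hinv
    -- c < n : one loop iteration
    rw [PySem.List.pyRange_one_cons (by omega : c < n)]
    simp only [pvAInner]
    rw [← hq]
    by_cases hskip : n ≤ c + d
    · -- j ≥ n : continue
      rw [if_pos hskip]
      have hdropeq : (pvBRow nums queries n q d prev).drop c.toNat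
          = (pvBRow nums queries n q d prev).drop (c+1).toNat := by
        rw [List.drop_eq_nil_of_le (by rw [pvBRow_length]; omega),
            List.drop_eq_nil_of_le (by rw [pvBRow_length]; omega)]
      have hinv' : pvInv nums queries n q prev d (c+1) dp := by
        obtain ⟨hL, hR, hV⟩ := hinv
        refine ⟨hL, hR, ?_⟩
        intro i j hi0 hin hj0 hjn hj
        rw [hV i j hi0 hin hj0 hjn hj]
        split_ifs <;> first | rfl | omega
      rcases ih (c+1) dp (by omega) (by omega) hinv' with ⟨h1, h2⟩ | ⟨h1, dp', h2, h3⟩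
      · exact Or.inl ⟨by rw [hdropeq]; exact h1, h2⟩
      · exact Or.inr ⟨by rw [hdropeq]; exact h1, dp', h2, h3⟩
    · -- j < n : the cell (c, c+d) is computed
      rw [if_neg hskip]
      obtain ⟨hL, hR, hV⟩ := hinv
      have hrowc : PySem.List.pyGetD dp c [] ∈ dp := by
        apply PySem.List.pyGetD_mem
        unfold PySem.Raise.InRange
        omega
      have hrowlen : ((PySem.List.pyGetD dp c []).length : Int) = n := hR _ hrowc
      have hcell0 : pvGet2 dp c (c+d) = 0 := by
        rw [hV c (c+d) hc0 (by omega) (by omega) (by omega) (by omega),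
            if_neg (by omega), if_neg (by omega)]
      -- head of the remaining row
      have hcL : c.toNat < (pvBRow nums queries n q d prev).length := by
        rw [pvBRow_length]; omega
      have hdropc : (pvBRow nums queries n q d prev).drop c.toNat
          = pvBody nums queries n q d prev c :: (pvBRow nums queries n q d prev).drop (c.toNat+1) := by
        rw [List.drop_eq_getElem_cons hcL]
        congr 1
        rw [← PySem.List.pyGetD_eq_getElem _ 0 hc0 (by exact_mod_cast by rw [pvBRow_length]; omega)]
        exact pvRowVal nums queries n q d c prev hc0 (by omega)
      have htn : (c+1).toNat = c.toNat + 1 := by omega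
      -- shared continuation
      have hcont : ∀ dpW : List (List Int),
          pvGet2 dpW c (c+d) = pvBody nums queries n q d prev c →
          pvInv nums queries n q prev d (c+1) dpW →
          (q ∈ (pvBRow nums queries n q d prev).drop c.toNat ∧
             (if pvGet2 dpW c (c+d) = q then (Except.error q : Except Int (List (List Int)))
              else pvAInner nums queries n d (PySem.List.pyRange (c+1) n 1) dpW) = .error q)
          ∨ (q ∉ (pvBRow nums queries n q d prev).drop c.toNat ∧
             ∃ dp', (if pvGet2 dpW c (c+d) = q then (Except.error q : Except Int (List (List Int)))
              else pvAInner nums queries n d (PySem.List.pyRange (c+1) n 1) dpW) = .ok dp' ∧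
               pvInv nums queries n q prev d n dp') := by
        intro dpW hreadW hinvW
        by_cases hqe : pvBody nums queries n q d prev c = q
        · left
          refine ⟨?_, by rw [hreadW, if_pos hqe]⟩
          rw [hdropc, hqe]
          exact List.mem_cons_self
        · rcases ih (c+1) dpW (by omega) (by omega) hinvW with ⟨h1, h2⟩ | ⟨h1, dp', h2, h3⟩
          · left
            rw [htn] at h1
            refine ⟨by rw [hdropc]; exact List.mem_cons_of_mem _ h1, ?_⟩
            rw [hreadW, if_neg hqe]
            exact h2
          · right
            rw [htn] at h1
            refine ⟨?_, dp', ?_, h3⟩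
            · rw [hdropc]
              intro hmem
              rcases List.mem_cons.mp hmem with he | ht
              · exact hqe he.symm
              · exact h1 ht
            · rw [hreadW, if_neg hqe]
              exact h2
      -- the four write/no-write branches
      by_cases hc : 0 < c
      · have hread1 : pvGet2 dp (c-1) (c+d) = PySem.List.pyGetD prev (c-1) 0 := by
          rw [hV (c-1) (c+d) (by omega) (by omega) (by omega) (by omega) (by omega),
              if_pos (by omega)]
        have hp1 : 0 ≤ PySem.List.pyGetD prev (c-1) 0 ∧ PySem.List.pyGetD prev (c-1) 0 < q := by
          apply hprev
          apply PySem.List.pyGetD_mem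
          unfold PySem.Raise.InRange
          omega
        by_cases hj1 : c + d + 1 < n
        · have hread2 : pvGet2 dp c (c+d+1) = PySem.List.pyGetD prev c 0 := by
            rw [hV c (c+d+1) hc0 (by omega) (by omega) (by omega) (by omega), if_pos rfl]
          have hp2 : 0 ≤ PySem.List.pyGetD prev c 0 ∧ PySem.List.pyGetD prev c 0 < q := by
            apply hprev
            apply PySem.List.pyGetD_mem
            unfold PySem.Raise.InRange
            omega
          rw [if_pos hc, if_pos hj1, hcell0, hread1,
              ← pvStep_of_lt queries q _ (PySem.List.pyGetD nums (c-1) 0) hp1.2,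
              max_eq_right (pvStep_bound queries q _ (PySem.List.pyGetD nums (c-1) 0) hq0 hp1.1 (by omega)).1,
              pvGet2_write_self dp c (c+d) _ hc0 (by omega) (by omega) (by rw [hrowlen]; omega),
              pvGet2_pvSet2 dp c (c+d) _ c (c+d+1) hc0 (by omega) (by omega) (by rw [hrowlen]; omega) hc0 (by omega),
              if_neg (by omega : ¬(c = c ∧ c + d + 1 = c + d)),
              hread2, ← pvStep_of_lt queries q _ (PySem.List.pyGetD nums (c+d+1) 0) hp2.2,
              pvSet2_pvSet2 dp c (c+d) _ _ hc0 (by omega)]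
          have hbody : pvBody nums queries n q d prev c
              = max (pvStep queries q (PySem.List.pyGetD prev (c-1) 0) (PySem.List.pyGetD nums (c-1) 0))
                  (pvStep queries q (PySem.List.pyGetD prev c 0) (PySem.List.pyGetD nums (c+d+1) 0)) := by
            unfold pvBody
            rw [if_pos (by omega : c + d + 1 < n), if_pos hc]
          rw [← hbody]
          exact hcont _ (pvGet2_write_self dp c (c+d) _ hc0 (by omega) (by omega) (by rw [hrowlen]; omega))
            (pvInv_write nums queries n q prev d c dp hd0 hc0 (by omega) ⟨hL, hR, hV⟩)
        · rw [if_pos hc, if_neg hj1, hcell0, hread1,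
              ← pvStep_of_lt queries q _ (PySem.List.pyGetD nums (c-1) 0) hp1.2,
              max_eq_right (pvStep_bound queries q _ (PySem.List.pyGetD nums (c-1) 0) hq0 hp1.1 (by omega)).1]
          have hbody : pvBody nums queries n q d prev c
              = pvStep queries q (PySem.List.pyGetD prev (c-1) 0) (PySem.List.pyGetD nums (c-1) 0) := by
            unfold pvBody
            rw [if_neg (by omega : ¬ c + d + 1 < n), if_pos hc]
          rw [← hbody]
          exact hcont _ (pvGet2_write_self dp c (c+d) _ hc0 (by omega) (by omega) (by rw [hrowlen]; omega))
            (pvInv_write nums queries n q prev d c dp hd0 hc0 (by omega) ⟨hL, hR, hV⟩)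
      · by_cases hj1 : c + d + 1 < n
        · have hread2 : pvGet2 dp c (c+d+1) = PySem.List.pyGetD prev c 0 := by
            rw [hV c (c+d+1) hc0 (by omega) (by omega) (by omega) (by omega), if_pos rfl]
          have hp2 : 0 ≤ PySem.List.pyGetD prev c 0 ∧ PySem.List.pyGetD prev c 0 < q := by
            apply hprev
            apply PySem.List.pyGetD_mem
            unfold PySem.Raise.InRange
            omega
          rw [if_neg hc, if_pos hj1, hcell0, hread2,
              ← pvStep_of_lt queries q _ (PySem.List.pyGetD nums (c+d+1) 0) hp2.2]
          have hbody : pvBody nums queries n q d prev c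
              = max 0 (pvStep queries q (PySem.List.pyGetD prev c 0) (PySem.List.pyGetD nums (c+d+1) 0)) := by
            unfold pvBody
            rw [if_pos (by omega : c + d + 1 < n), if_neg hc]
          rw [← hbody]
          exact hcont _ (pvGet2_write_self dp c (c+d) _ hc0 (by omega) (by omega) (by rw [hrowlen]; omega))
            (pvInv_write nums queries n q prev d c dp hd0 hc0 (by omega) ⟨hL, hR, hV⟩)
        · have hbody : pvBody nums queries n q d prev c = 0 := by
            unfold pvBody
            rw [if_neg (by omega : ¬ c + d + 1 < n), if_neg hc]
          rw [if_neg hc, if_neg hj1]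
          exact hcont dp (hcell0.trans hbody.symm)
            (pvInv_nowrite nums queries n q prev d c dp hd0 hc0 (by omega) hbody ⟨hL, hR, hV⟩)

theorem pvAOuter_spec (nums queries : List Int) (n q : Int)
    (hq : q = (queries.length : Int)) (hn : 1 ≤ n) :
    ∀ (m : Nat) (d : Int), (d+1).toNat ≤ m → -1 ≤ d → d ≤ n - 1 →
    (∀ d', d < d' → d' ≤ n - 1 → q ∉ pvRow nums queries n q d') →
    ∀ dp, pvInv nums queries n q (pvRow nums queries n q (d+1)) d 0 dp →
    (q ∈ pvRow nums queries n q 0 ∧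
       pvAOuter nums queries n (PySem.List.pyRange d (-1) (-1)) dp = .error q)
    ∨ (q ∉ pvRow nums queries n q 0 ∧
       ∃ dp', pvAOuter nums queries n (PySem.List.pyRange d (-1) (-1)) dp = .ok dp' ∧
         pvInv nums queries n q (pvRow nums queries n q 0) (-1) 0 dp') := by
  have hq0 : 0 ≤ q := by rw [hq]; positivity
  have hbase : ∀ (dp : List (List Int)),
      (∀ d', (-1:Int) < d' → d' ≤ n - 1 → q ∉ pvRow nums queries n q d') →
      pvInv nums queries n q (pvRow nums queries n q (-1+1)) (-1) 0 dp →
      (q ∈ pvRow nums queries n q 0 ∧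
         pvAOuter nums queries n (PySem.List.pyRange (-1) (-1) (-1)) dp = .error q)
      ∨ (q ∉ pvRow nums queries n q 0 ∧
         ∃ dp', pvAOuter nums queries n (PySem.List.pyRange (-1) (-1) (-1)) dp = .ok dp' ∧
           pvInv nums queries n q (pvRow nums queries n q 0) (-1) 0 dp') := by
    intro dp hno hinv
    rw [PySem.List.pyRange_neg_one_eq_nil (by omega)]
    right
    rw [show (-1:Int)+1 = 0 by ring] at hinv
    exact ⟨hno 0 (by omega) (by omega), dp, rfl, hinv⟩
  intro m
  induction m with
  | zero =>
    intro d hm h1 h2 hno dp hinv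
    have hd : d = -1 := by omega
    subst hd
    exact hbase dp hno hinv
  | succ m ih =>
    intro d hm h1 h2 hno dp hinv
    by_cases hd : d = -1
    · subst hd
      exact hbase dp hno hinv
    have hd0 : 0 ≤ d := by omega
    rw [PySem.List.pyRange_neg_one_cons (by omega : (-1:Int) < d)]
    simp only [pvAOuter]
    have hprevb : ∀ v ∈ pvRow nums queries n q (d+1), 0 ≤ v ∧ v < q := by
      intro v hv
      have hb := pvRow_bound nums queries n q hq0 (d+1) v hv
      have hne : v ≠ q := by
        intro he
        by_cases hdd : d + 1 ≤ n - 1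
        · exact hno (d+1) (by omega) hdd (he ▸ hv)
        · rw [pvRow_of_ge nums queries n q (d+1) (by omega)] at hv
          cases hv
      exact ⟨hb.1, lt_of_le_of_ne hb.2 hne⟩
    have hlenp : ((pvRow nums queries n q (d+1)).length : Int) = n - d - 1 := by
      rw [pvRow_length]
      omega
    have hinner := pvAInner_spec nums queries n q d (pvRow nums queries n q (d+1))
      hq hd0 h2 hprevb hlenp (n - 0).toNat 0 dp le_rfl le_rfl hinv
    rcases hinner with ⟨hmem, heq⟩ | ⟨hnomem, dp', heq, hinv'⟩
    · left
      have hq_d : q ∈ pvRow nums queries n q d := by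
        rw [pvRow_rec nums queries n q d h2]
        simpa using hmem
      exact ⟨pvRow_to_zero nums queries n q hq0 d hd0 hq_d, by rw [heq]⟩
    · have hinv'' : pvInv nums queries n q (pvRow nums queries n q ((d-1)+1)) (d-1) 0 dp' := by
        rw [show d-1+1 = d by ring]
        exact pvInv_shift nums queries n q (pvRow nums queries n q (d+1)) (pvRow nums queries n q d)
          d dp' hinv' (pvRow_rec nums queries n q d h2)
      have hno' : ∀ d', d - 1 < d' → d' ≤ n - 1 → q ∉ pvRow nums queries n q d' := by
        intro d' hlt hle
        by_cases hde : d' = d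
        · subst hde
          rw [pvRow_rec nums queries n q d' h2]
          simpa using hnomem
        · exact hno d' (by omega) hle
      have := ih (d-1) (by omega) (by omega) (by omega) hno' dp' hinv''
      rcases this with ⟨h1', h2'⟩ | ⟨h1', dp'', h2', h3'⟩
      · exact Or.inl ⟨h1', by rw [heq]; exact h2'⟩
      · exact Or.inr ⟨h1', dp'', by rw [heq]; exact h2', h3'⟩

-- when q occurs in the final row, B's maximum is exactly q
theorem pvMaxRow (nums queries : List Int) (n q : Int) (hq0 : 0 ≤ q) (_hn : 1 ≤ n)
    (hmem : q ∈ pvRow nums queries n q 0) :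
    ((PySem.List.max? ((PySem.List.pyRange 0 n 1).map (fun i =>
        pvStep queries q (PySem.List.pyGetD (pvRow nums queries n q 0) i 0)
          (PySem.List.pyGetD nums i 0))) (fun x => x)).getD 0) = q := by
  have hlen : (pvRow nums queries n q 0).length = (n - 0).toNat := pvRow_length nums queries n q 0
  obtain ⟨k, hk, hval⟩ := List.mem_iff_getElem.mp hmem
  have hkn : (k : Int) < n := by rw [hlen] at hk; omega
  have hQin : q ∈ (PySem.List.pyRange 0 n 1).map (fun i =>
      pvStep queries q (PySem.List.pyGetD (pvRow nums queries n q 0) i 0)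
        (PySem.List.pyGetD nums i 0)) := by
    refine List.mem_map.mpr ⟨(k : Int), PySem.List.mem_pyRange_one.mpr ⟨by positivity, hkn⟩, ?_⟩
    have hg : PySem.List.pyGetD (pvRow nums queries n q 0) (k : Int) 0 = q := by
      rw [PySem.List.pyGetD_eq_getElem _ 0 (by positivity) (by exact_mod_cast hk)]
      simpa using hval
    rw [hg, pvStep_of_eq]
  have hub : ∀ y ∈ (PySem.List.pyRange 0 n 1).map (fun i =>
      pvStep queries q (PySem.List.pyGetD (pvRow nums queries n q 0) i 0)
        (PySem.List.pyGetD nums i 0)), y ≤ q := by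
    intro y hy
    rcases List.mem_map.mp hy with ⟨i, _, rfl⟩
    have hg := pyGetD_prop (P := fun v => 0 ≤ v ∧ v ≤ q) (pvRow nums queries n q 0) i 0
      ⟨le_refl 0, hq0⟩ (pvRow_bound nums queries n q hq0 0)
    exact (pvStep_bound queries q _ (PySem.List.pyGetD nums i 0) hq0 hg.1 hg.2).2
  rcases hmax : PySem.List.max? ((PySem.List.pyRange 0 n 1).map (fun i =>
      pvStep queries q (PySem.List.pyGetD (pvRow nums queries n q 0) i 0)
        (PySem.List.pyGetD nums i 0))) (fun x => x) with _ | m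
  · rw [PySem.List.max?_eq_none_iff] at hmax
    rw [hmax] at hQin
    cases hQin
  · have h1 : m ≤ q := hub m (PySem.List.max?_mem hmax)
    have h2 : q ≤ m := PySem.List.max?_isMax hmax q hQin
    simp only [Option.getD_some]
    omega

-- ===== VERDICT (by name: the statement is the Claim_ definition above) =====
theorem maximumProcessableQueries_spec : Claim_equal_maximumProcessableQueries := by
  unfold Claim_equal_maximumProcessableQueries
  intro nums queries _ hpre
  unfold Spec_maximumProcessableQueries
  unfold Pre_maximumProcessableQueries at hpre
  have hn : 1 ≤ (nums.length : Int) := by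
    have : nums.length ≠ 0 := fun h => hpre (List.eq_nil_of_length_eq_zero h)
    omega
  have hq0 : 0 ≤ (queries.length : Int) := by positivity
  have hinv0 : pvInv nums queries (nums.length : Int) (queries.length : Int)
      (pvRow nums queries (nums.length : Int) (queries.length : Int) (((nums.length : Int) - 1) + 1))
      ((nums.length : Int) - 1) 0
      (List.replicate nums.length (List.replicate nums.length (0:Int))) := by
    refine ⟨by simp, ?_, ?_⟩
    · intro r hr
      rw [List.eq_of_mem_replicate hr]
      simp
    · intro i j hi0 hin hj0 hjn hj
      rw [pvGet2_replicate, if_neg (by omega), if_neg (by omega)]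
  have houter := pvAOuter_spec nums queries (nums.length : Int) (queries.length : Int) rfl hn
    ((nums.length : Int) - 1 + 1).toNat ((nums.length : Int) - 1) le_rfl (by omega) (by omega)
    (by intro d' hgt hle; exact absurd hgt (by omega))
    (List.replicate nums.length (List.replicate nums.length (0:Int))) hinv0
  simp only [maximumProcessableQueries, maximumProcessableQueries_alt]
  have halt : (PySem.List.pyRange 0 (nums.length : Int) 1).map (fun i =>
      pvStep queries (queries.length : Int)
        (pvF nums queries (nums.length : Int) (queries.length : Int) i i)
        (PySem.List.pyGetD nums i 0))
      = (PySem.List.pyRange 0 (nums.length : Int) 1).map (fun i =>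
      pvStep queries (queries.length : Int)
        (PySem.List.pyGetD (pvRow nums queries (nums.length : Int) (queries.length : Int) 0) i 0)
        (PySem.List.pyGetD nums i 0)) := by
    apply List.map_congr_left
    intro i hi
    rcases PySem.List.mem_pyRange_one.mp hi with ⟨hi0, hin⟩
    rw [pvF_eq_row nums queries (nums.length : Int) (queries.length : Int)
        (i.toNat + ((nums.length : Int) - 1 - i).toNat) i i le_rfl hi0 le_rfl hin,
        show i - i = (0:Int) by ring]
  rw [halt]
  rcases houter with ⟨hmem, heq⟩ | ⟨hnomem, dp', heq, hinv'⟩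
  · rw [heq, pvMaxRow nums queries (nums.length : Int) (queries.length : Int) hq0 hn hmem]
  · rw [heq]
    have hlist : (PySem.List.pyRange 0 (nums.length : Int) 1).map (fun i =>
        pvGet2 dp' i i +
          (if PySem.List.pyGetD queries (pvGet2 dp' i i) 0 ≤ PySem.List.pyGetD nums i 0
           then (1:Int) else 0))
        = (PySem.List.pyRange 0 (nums.length : Int) 1).map (fun i =>
        pvStep queries (queries.length : Int)
          (PySem.List.pyGetD (pvRow nums queries (nums.length : Int) (queries.length : Int) 0) i 0)
          (PySem.List.pyGetD nums i 0)) := by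
      apply List.map_congr_left
      intro i hi
      rcases PySem.List.mem_pyRange_one.mp hi with ⟨hi0, hin⟩
      have hdiag : pvGet2 dp' i i
          = PySem.List.pyGetD (pvRow nums queries (nums.length : Int) (queries.length : Int) 0) i 0 := by
        rw [hinv'.2.2 i i hi0 hin hi0 hin (by omega), if_pos (by omega)]
      have hvmem : PySem.List.pyGetD (pvRow nums queries (nums.length : Int) (queries.length : Int) 0) i 0
          ∈ pvRow nums queries (nums.length : Int) (queries.length : Int) 0 := by
        apply PySem.List.pyGetD_mem
        unfold PySem.Raise.InRange
        rw [pvRow_length]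
        omega
      have hb := pvRow_bound nums queries (nums.length : Int) (queries.length : Int) hq0 0
        (PySem.List.pyGetD (pvRow nums queries (nums.length : Int) (queries.length : Int) 0) i 0) hvmem
      have hlt : PySem.List.pyGetD (pvRow nums queries (nums.length : Int) (queries.length : Int) 0) i 0
          < (queries.length : Int) := by
        rcases lt_or_eq_of_le hb.2 with h | h
        · exact h
        · exfalso
          apply hnomem
          nth_rewrite 2 [← h]
          exact hvmem
      rw [hdiag, pvStep_of_lt queries (queries.length : Int) _ _ hlt]
    exact congrArg (fun L => (PySem.List.max? L (fun (x : Int) => x)).getD 0) hlist
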